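-- pv_equiv track=rewrite | github.com/xtfbciqy/Private | reactionbalance/reactionbalancemain.py | generate_permutations_func
-- ===== SOURCE A (Python) =====
-- def generate_permutations_func(size_range_para2, n_para2):
--     def recursive_func(current_para3):
--         if len(current_para3) == n_para2:
--             permutation_result.append(current_para3)
--             return
--         for i in size_range_para2:
--             recursive_func(current_para3 + [i])
--     permutation_result = []
--     recursive_func([])
--     return permutation_result
-- ===== SOURCE B (Python) =====
-- def generate_permutations_func(size_range_para2, n_para2):
--     result = [[]]
--     for _ in range(n_para2):
--         result = [r + [i] for r in result for i in size_range_para2]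
--     return result
-- ===== Notes on version B (the rewrite author's own statement) =====
-- stated objective: simpler
-- what changed: Replaces the recursive prefix-extension with the standard iterative Cartesian-product loop: start from [[]] and n times extend every partial tuple by each value.
-- outside the precondition, e.g. on generate_permutations_func([], -1): A returns [], B returns [[]]
import Mathlib
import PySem

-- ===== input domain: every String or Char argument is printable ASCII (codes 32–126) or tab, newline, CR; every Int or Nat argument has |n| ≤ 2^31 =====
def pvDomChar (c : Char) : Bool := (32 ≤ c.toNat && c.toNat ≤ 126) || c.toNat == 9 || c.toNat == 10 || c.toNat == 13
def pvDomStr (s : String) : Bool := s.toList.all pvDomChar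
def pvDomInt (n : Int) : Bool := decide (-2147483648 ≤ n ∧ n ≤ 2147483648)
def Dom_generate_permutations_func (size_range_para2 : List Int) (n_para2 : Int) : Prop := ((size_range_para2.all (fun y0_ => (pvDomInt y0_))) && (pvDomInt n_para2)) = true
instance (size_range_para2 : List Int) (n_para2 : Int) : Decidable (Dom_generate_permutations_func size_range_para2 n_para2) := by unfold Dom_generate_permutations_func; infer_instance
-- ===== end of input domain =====

-- B replaces A's recursion over the prefix with the standard iterative Cartesian-product loop (simpler decomposition, same cost).


-- ===== PORT A =====
-- A's inner recursive_func: recursion on current's growing length; fuel = n - len(current),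
-- exact for n ≥ 0 (the fuel-0 fallback is unreachable then: fuel 0 means len(current) = n).
def pvRecA (size_range_para2 : List Int) (n_para2 : Int) : Nat → List Int → List (List Int) → List (List Int)
  | fuel, current, acc =>
    if (current.length : Int) = n_para2 then acc ++ [current]
    else
      match fuel with
      | 0 => acc
      | f + 1 => size_range_para2.foldl (fun a i => pvRecA size_range_para2 n_para2 f (current ++ [i]) a) acc

def generate_permutations_func (size_range_para2 : List Int) (n_para2 : Int) : List (List Int) :=
  pvRecA size_range_para2 n_para2 n_para2.toNat [] []

-- ===== PORT B =====
-- 'for _ in range(n)': n.toNat iterations (range is empty for n < 0); the comprehension is a flatMap of maps.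
def generate_permutations_func_alt (size_range_para2 : List Int) (n_para2 : Int) : List (List Int) :=
  (List.range n_para2.toNat).foldl
    (fun result _ => result.flatMap (fun r => size_range_para2.map (fun i => r ++ [i])))
    [[]]

-- ===== PRECONDITION & SPEC =====
-- Pre_ excludes n_para2 < 0: there A raises RecursionError on non-empty size_range_para2,
-- and on empty size_range_para2 it returns the accidental [] where B's loop naturally gives [[]].
def Pre_generate_permutations_func (size_range_para2 : List Int) (n_para2 : Int) : Prop := 0 ≤ n_para2
instance (size_range_para2 : List Int) (n_para2 : Int) : Decidable (Pre_generate_permutations_func size_range_para2 n_para2) := by unfold Pre_generate_permutations_func; infer_instance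
def pvWitness_generate_permutations_func : List Int × Int := ([1, 2], 2)

def Spec_generate_permutations_func (size_range_para2 : List Int) (n_para2 : Int) (out : List (List Int)) : Prop := out = generate_permutations_func_alt size_range_para2 n_para2
instance (size_range_para2 : List Int) (n_para2 : Int) (out : List (List Int)) : Decidable (Spec_generate_permutations_func size_range_para2 n_para2 out) := by unfold Spec_generate_permutations_func; infer_instance

-- ===== CLAIM (what is proved, stated in full; the proofs are below) =====
def Claim_equal_generate_permutations_func : Prop := ∀ (size_range_para2 : List Int) (n_para2 : Int), Dom_generate_permutations_func size_range_para2 n_para2 → Pre_generate_permutations_func size_range_para2 n_para2 → Spec_generate_permutations_func size_range_para2 n_para2 (generate_permutations_func size_range_para2 n_para2)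

-- ===== LEMMAS AND PROOFS =====

-- All length-k tuples over `size` in lexicographic order (most significant element first).
def pvProd (size : List Int) : Nat → List (List Int)
  | 0 => [[]]
  | k + 1 => size.flatMap (fun i => (pvProd size k).map (fun t => i :: t))

theorem pvRecA_eq (size : List Int) (n : Int) (fuel : Nat) (current : List Int)
    (acc : List (List Int)) (h : n = (current.length : Int) + fuel) :
    pvRecA size n fuel current acc = acc ++ (pvProd size fuel).map (fun t => current ++ t) := by
  induction fuel generalizing current acc with
  | zero =>
    rw [pvRecA]
    simp [pvProd, h]
  | succ f ih =>
    rw [pvRecA]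
    have hne : ¬ ((current.length : Int) = n) := by omega
    rw [if_neg hne]
    have hstep : ∀ (a : List (List Int)) (i : Int),
        pvRecA size n f (current ++ [i]) a
          = a ++ ((pvProd size f).map (fun t => (current ++ [i]) ++ t)) := by
      intro a i
      exact ih (current ++ [i]) a (by simp; omega)
    calc size.foldl (fun a i => pvRecA size n f (current ++ [i]) a) acc
        = size.foldl (fun a i => a ++ ((pvProd size f).map (fun t => (current ++ [i]) ++ t))) acc := by
          apply PySem.List.foldl_congr_mem
          intro a i _
          exact hstep a i
      _ = acc ++ size.flatMap (fun i => (pvProd size f).map (fun t => (current ++ [i]) ++ t)) :=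
          PySem.List.foldl_append_eq_flatMap _ _ _
      _ = acc ++ (pvProd size (f + 1)).map (fun t => current ++ t) := by
          simp [pvProd, List.map_flatMap, List.map_map, Function.comp_def]

-- One iteration of B's loop applied to all k-tuples yields all (k+1)-tuples.
theorem pvStep_prod (size : List Int) (k : Nat) :
    (pvProd size k).flatMap (fun r => size.map (fun i => r ++ [i])) = pvProd size (k + 1) := by
  induction k with
  | zero =>
    simp only [pvProd]
    induction size with
    | nil => simp
    | cons a tl ihs => simp_all [List.flatMap_cons]
  | succ f ih =>
    conv_lhs => rw [pvProd]
    rw [List.flatMap_assoc]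
    conv_rhs => rw [pvProd, ← ih]
    simp [List.flatMap_map, List.map_flatMap, List.map_map, Function.comp_def]

theorem pvAlt_eq (size : List Int) (k : Nat) :
    (List.range k).foldl
      (fun result _ => result.flatMap (fun r => size.map (fun i => r ++ [i]))) [[]]
      = pvProd size k := by
  induction k with
  | zero => simp [pvProd]
  | succ f ih => rw [List.range_succ, List.foldl_append, ih, List.foldl_cons, List.foldl_nil, pvStep_prod]

-- ===== VERDICT (by name: the statement is the Claim_ definition above) =====
theorem generate_permutations_func_spec : Claim_equal_generate_permutations_func := by
  intro size n _ hpre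
  unfold Pre_generate_permutations_func at hpre
  unfold Spec_generate_permutations_func generate_permutations_func generate_permutations_func_alt
  rw [pvRecA_eq size n n.toNat [] [] (by simp; omega), pvAlt_eq]
  simp
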